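-- pv_equiv track=rewrite | github.com/gsmin02/Algorithm | 프로그래머스/0/181874. A 강조하기/A 강조하기.py | solution
-- ===== SOURCE A (Python) =====
-- def solution(myString):
--     answer = ''
--     for my_str in myString:
--         if my_str.lower() == "a":
--             answer += my_str.upper()
--         else:
--             answer += my_str.lower()
--     return answer
-- ===== SOURCE B (Python) =====
-- def solution(myString):
--     return myString.lower().replace('a', 'A')
-- ===== Notes on version B (the rewrite author's own statement) =====
-- stated objective: simpler
-- what changed: Replaces the per-character branching loop with quadratic string concatenation by two whole-string library passes: lowercase everything, then substitute every lowercase a with uppercase A via str.replace.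
import Mathlib
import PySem

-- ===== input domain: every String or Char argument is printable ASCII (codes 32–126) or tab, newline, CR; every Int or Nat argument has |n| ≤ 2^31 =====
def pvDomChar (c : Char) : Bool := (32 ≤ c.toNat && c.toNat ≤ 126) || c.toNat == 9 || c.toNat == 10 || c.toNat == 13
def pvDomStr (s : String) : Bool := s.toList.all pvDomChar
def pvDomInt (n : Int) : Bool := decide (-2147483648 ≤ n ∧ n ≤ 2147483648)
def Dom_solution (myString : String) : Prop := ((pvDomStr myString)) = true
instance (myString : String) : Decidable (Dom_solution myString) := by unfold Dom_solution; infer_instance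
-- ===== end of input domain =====

-- B replaces A's per-character branching accumulation with two whole-string passes: lower() then replace('a','A') (simpler).

-- ===== PORT A =====
def solution (myString : String) : String :=
  myString.toList.foldl
    (fun answer c =>
      if PySem.Chars.lowerChar c = 'a' then answer.push (PySem.Chars.upperChar c)
      else answer.push (PySem.Chars.lowerChar c))
    ""

-- ===== PORT B =====
def solution_alt (myString : String) : String :=
  PySem.Str.replace (PySem.Str.lower myString) "a" "A"

-- ===== PRECONDITION & SPEC =====
def Spec_solution (myString : String) (out : String) : Prop := out = solution_alt myString
instance (myString : String) (out : String) : Decidable (Spec_solution myString out) := by unfold Spec_solution; infer_instance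

-- ===== CLAIM (what is proved, stated in full; the proofs are below) =====
def Claim_equal_solution : Prop := ∀ (myString : String), Dom_solution myString → Spec_solution myString (solution myString)

-- ===== LEMMAS AND PROOFS =====

-- single-character replace is a pointwise map
theorem replace_go_single (l acc : List Char) :
    PySem.Chars.replace.go ['a'] ['A'] l.length l acc
      = acc.reverse ++ l.map (fun c => if c = 'a' then 'A' else c) := by
  induction l generalizing acc with
  | nil => simp [PySem.Chars.replace.go]
  | cons c t ih =>
    by_cases h : c = 'a'
    · simp [PySem.Chars.replace.go, List.isPrefixOf, h, ih]
    · simp only [List.length_cons, PySem.Chars.replace.go, List.isPrefixOf, List.map_cons]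
      rw [if_neg (by simp; exact fun hh => absurd hh.symm h), ih]
      simp [h]

theorem replace_single (l : List Char) :
    PySem.Chars.replace l ['a'] ['A'] = l.map (fun c => if c = 'a' then 'A' else c) := by
  simpa [PySem.Chars.replace] using replace_go_single l []

theorem lowerChar_eq_a_upper (c : Char) (h : PySem.Chars.lowerChar c = 'a') :
    PySem.Chars.upperChar c = 'A' := by
  unfold PySem.Chars.lowerChar at h
  split_ifs at h with hu
  · -- c is an uppercase letter and lowering it gives 'a', so c = 'A'
    have hZn : c.toNat ≤ 90 := by
      have : c ≤ 'Z' := by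
        simp [PySem.Chars.isupper] at hu
        exact hu.2
      exact Char.le_def.mp this
    have hvalid : Nat.isValidChar (c.toNat + 32) := Or.inl (by omega)
    have h97 : c.toNat + 32 = 97 := by
      have := congrArg Char.toNat h
      rwa [Char.toNat_ofNat, if_pos hvalid] at this
    have hc : c = 'A' := by
      calc c = Char.ofNat c.toNat := (Char.ofNat_toNat c).symm
        _ = 'A' := by rw [show c.toNat = 65 by omega]
    subst hc; decide
  · subst h; decide

theorem fold_toList (l : List Char) (s : String) :
    (l.foldl
      (fun answer c =>
        if PySem.Chars.lowerChar c = 'a' then answer.push (PySem.Chars.upperChar c)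
        else answer.push (PySem.Chars.lowerChar c)) s).toList
      = s.toList ++ l.map (fun c =>
          if PySem.Chars.lowerChar c = 'a' then PySem.Chars.upperChar c
          else PySem.Chars.lowerChar c) := by
  induction l generalizing s with
  | nil => simp
  | cons c t ih => by_cases h : PySem.Chars.lowerChar c = 'a' <;> simp [h, ih]

-- ===== VERDICT (by name: the statement is the Claim_ definition above) =====
theorem solution_spec : Claim_equal_solution := by
  intro s _
  unfold Spec_solution solution solution_alt
  apply String.toList_injective
  rw [fold_toList]
  have hB : (PySem.Str.replace (PySem.Str.lower s) "a" "A").toList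
      = (s.toList.map PySem.Chars.lowerChar).map (fun c => if c = 'a' then 'A' else c) := by
    simp [PySem.Str.replace, PySem.Str.lower, replace_single, PySem.Chars.lower]
  rw [hB, List.map_map]
  simp only [String.toList_empty, List.nil_append]
  apply List.map_congr_left
  intro c _
  by_cases h : PySem.Chars.lowerChar c = 'a'
  · simp [h, lowerChar_eq_a_upper c h]
  · simp [h]
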